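-- pv_equiv track=rewrite | github.com/LeInS-dev/owasp-wstg-framework | advanced_wstg_orchestrator.py | _assess_phase_risk_level
-- ===== SOURCE A (Python) =====
-- from typing import List, Dict, Any
--
-- def _assess_phase_risk_level(result: Any) -> str:
--     """Evaluar nivel de riesgo de una fase"""
--     if isinstance(result, list):
--         critical_findings = len([r for r in result if r.get('risk_level') == 'Critical'])
--         high_findings = len([r for r in result if r.get('risk_level') == 'High'])
--
--         if critical_findings > 0:
--             return 'critical'
--         elif high_findings > 0:
--             return 'high'
--         elif len(result) > 0:
--             return 'medium'
--         else:
--             return 'low'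
--
--     return 'unknown'
-- ===== SOURCE B (Python) =====
-- from typing import List, Dict, Any
--
-- _LABELS = ('low', 'medium', 'high', 'critical')
--
-- def _assess_phase_risk_level(result: Any) -> str:
--     """Evaluar nivel de riesgo de una fase"""
--     if not isinstance(result, list):
--         return 'unknown'
--     best = -1
--     for r in result:
--         lvl = r.get('risk_level')
--         rank = 2 if lvl == 'Critical' else (1 if lvl == 'High' else 0)
--         if rank > best:
--             best = rank
--             if best == 2:
--                 break
--     return _LABELS[best + 1]
-- ===== Notes on version B (the rewrite author's own statement) =====
-- stated objective: alternative
-- what changed: A does two full counting scans and a branch chain over the counts; B does a single max-severity reduction (numeric ranks Critical=2/High=1/other=0, seeded at -1, early break) and indexes a label table by the resulting rank.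
import Mathlib
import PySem

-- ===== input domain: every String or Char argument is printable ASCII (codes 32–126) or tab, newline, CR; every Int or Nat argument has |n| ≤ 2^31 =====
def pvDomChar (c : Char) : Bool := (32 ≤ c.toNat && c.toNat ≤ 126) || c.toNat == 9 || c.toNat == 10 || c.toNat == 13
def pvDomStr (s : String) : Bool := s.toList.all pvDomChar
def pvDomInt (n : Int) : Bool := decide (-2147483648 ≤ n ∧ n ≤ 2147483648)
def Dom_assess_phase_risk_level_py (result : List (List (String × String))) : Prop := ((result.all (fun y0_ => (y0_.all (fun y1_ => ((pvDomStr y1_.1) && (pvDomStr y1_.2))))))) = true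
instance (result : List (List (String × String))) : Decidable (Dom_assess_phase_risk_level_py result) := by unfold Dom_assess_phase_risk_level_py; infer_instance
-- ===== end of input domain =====

-- B replaces A's two counting scans with one max-severity pass over numeric ranks plus a table lookup; same value everywhere (typed domain: input is always a list, so A's 'unknown' branch is unreachable).
-- ===== PORT A =====
-- r.get('risk_level'): Python dict modelled as association list, built as a dict (last key wins), then looked up
def pvGetRisk (r : List (String × String)) : Option String :=
  (PySem.Dict.ofList r).get? "risk_level"

def assess_phase_risk_level_py (result : List (List (String × String))) : String :=
  -- isinstance(result, list) is always true for this typed input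
  let critical_findings : Int := ((result.filter (fun r => pvGetRisk r == some "Critical")).length : Int)
  let high_findings : Int := ((result.filter (fun r => pvGetRisk r == some "High")).length : Int)
  if critical_findings > 0 then "critical"
  else if high_findings > 0 then "high"
  else if (result.length : Int) > 0 then "medium"
  else "low"

-- ===== PORT B =====
def pvLabels : List String := ["low", "medium", "high", "critical"]

-- the for-loop with early break: running maximum of ranks
def pvBestRank : List (List (String × String)) → Int → Int
  | [], best => best
  | r :: rest, best =>
      let lvl := pvGetRisk r
      let rank : Int := if lvl == some "Critical" then 2 else if lvl == some "High" then 1 else 0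
      if rank > best then
        if rank == 2 then rank else pvBestRank rest rank
      else pvBestRank rest best

def assess_phase_risk_level_py_alt (result : List (List (String × String))) : String :=
  -- _LABELS[best + 1]; best ∈ [-1, 2] so the index is always in range
  (PySem.List.pyGet? pvLabels (pvBestRank result (-1) + 1)).getD ""

-- ===== PRECONDITION & SPEC =====
def Spec_assess_phase_risk_level_py (result : List (List (String × String))) (out : String) : Prop := out = assess_phase_risk_level_py_alt result
instance (result : List (List (String × String))) (out : String) : Decidable (Spec_assess_phase_risk_level_py result out) := by unfold Spec_assess_phase_risk_level_py; infer_instance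

-- ===== CLAIM (what is proved, stated in full; the proofs are below) =====
def Claim_equal_assess_phase_risk_level_py : Prop := ∀ (result : List (List (String × String))), Dom_assess_phase_risk_level_py result → Spec_assess_phase_risk_level_py result (assess_phase_risk_level_py result)

-- ===== LEMMAS AND PROOFS =====

-- characterisation of the max-severity loop for any seed ≤ 1
lemma pvBestRank_eq (l : List (List (String × String))) (b : Int) (hb : b ≤ 1) :
    pvBestRank l b =
      if l.any (fun r => pvGetRisk r == some "Critical") then 2
      else if b = 1 ∨ l.any (fun r => pvGetRisk r == some "High") then 1
      else if b = 0 ∨ l ≠ [] then 0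
      else b := by
  induction l generalizing b with
  | nil => simp [pvBestRank]; split_ifs <;> omega
  | cons r rest ih =>
      by_cases hc : pvGetRisk r == some "Critical"
      · simp [pvBestRank, hc, show (2:Int) > b by omega]
      · by_cases hh : pvGetRisk r == some "High"
        · have h1 : pvBestRank rest 1 =
              if rest.any (fun r => pvGetRisk r == some "Critical") then 2 else 1 := by
            rw [ih 1 le_rfl]; simp
          by_cases hb1 : b = 1
          · subst hb1
            simp [pvBestRank, hc, hh, h1]
          · have : (1:Int) > b := by omega
            simp [pvBestRank, hc, hh, this, h1]
        · by_cases hb0 : (0:Int) > b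
          · have h0 := ih 0 (by omega)
            have hb1 : b ≠ 1 := by omega
            simp [pvBestRank, hc, hh, hb0, h0, hb1]
          · have hbv := ih b hb
            simp [pvBestRank, hc, hh, hb0, hbv]
            rcases (show b = 0 ∨ b = 1 by omega) with h | h <;> simp [h]

lemma pv_any_iff_filter (result : List (List (String × String))) (v : String) :
    result.any (fun r => pvGetRisk r == some v) =
      decide (0 < (result.filter (fun r => pvGetRisk r == some v)).length) := by
  induction result with
  | nil => simp
  | cons r rest ih => by_cases h : pvGetRisk r == some v <;> simp [h, ih]

-- ===== VERDICT =====
theorem assess_phase_risk_level_py_spec : Claim_equal_assess_phase_risk_level_py := by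
  intro result _
  unfold Spec_assess_phase_risk_level_py assess_phase_risk_level_py assess_phase_risk_level_py_alt
  have hb := pvBestRank_eq result (-1) (by omega)
  have hc := pv_any_iff_filter result "Critical"
  have hh := pv_any_iff_filter result "High"
  rw [hc, hh] at hb
  by_cases h1 : 0 < (result.filter (fun r => pvGetRisk r == some "Critical")).length <;>
  by_cases h2 : 0 < (result.filter (fun r => pvGetRisk r == some "High")).length <;>
  by_cases h3 : result = [] <;>
  simp_all [pvLabels, PySem.List.pyGet?, PySem.List.pyIdx?, Int.natCast_pos, List.length_pos_iff]
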